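-- pv_equiv track=rewrite | github.com/alexofceaser85/Subnet_Calculator | src/main/python/subnet_calculator.py | convert_netmask_bits_to_binary
-- ===== SOURCE A (Python) =====
-- def convert_netmask_bits_to_binary(netmask, max_length, period_index):
--     """
--     Converts netmask bits to a binary string
--     """
--
--     netmask_bits_index = 0
--     current_netmask_bits = int(netmask)
--     binary_netmask = ''
--
--     while(netmask_bits_index <= max_length):
--
--         if (netmask_bits_index % period_index == 0):
--             binary_netmask += '.'
--             netmask_bits_index += 1
--         elif (current_netmask_bits != 0):
--             binary_netmask += '1'
--             current_netmask_bits -= 1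
--             netmask_bits_index += 1
--         else:
--             binary_netmask += '0'
--             netmask_bits_index += 1
--
--     binary_netmask_no_leading_period = binary_netmask[1:]
--     return binary_netmask_no_leading_period
-- ===== SOURCE B (Python) =====
-- def convert_netmask_bits_to_binary(netmask, max_length, period_index):
--     """
--     Converts netmask bits to a binary string
--     """
--     num_groups = max_length // period_index + 1
--     num_bits = (max_length + 1) - num_groups
--     n = int(netmask)
--     bits = []
--     for _ in range(num_bits):
--         bits.append('1' if n != 0 else '0')
--         if n != 0:
--             n -= 1
--     bit_string = ''.join(bits)
--     group_size = period_index - 1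
--     return '.'.join(bit_string[k * group_size:(k + 1) * group_size]
--                     for k in range(num_groups))
-- ===== Notes on version B (the rewrite author's own statement) =====
-- stated objective: alternative
-- what changed: A interleaves dots and bits in a single stateful while-loop over every position; B counts the groups in closed form (floor division), builds the flat bit string in one pass, then slices it into fixed-size groups and joins them with '.'. Pre_ restricts period_index to the natural domain (positive group period): on period_index = 0 A raises ZeroDivisionError for max_length >= 0 (and B's floor division raises even for max_length < 0), and a non-positive period is outside the function's purpose, where B's group arithmetic does not model A's negative-modulus dot placement.
-- outside the precondition, e.g. on convert_netmask_bits_to_binary(3, 5, -3): A returns '11.10', B returns ''; on convert_netmask_bits_to_binary(3, -1, 0): A returns '', B raises ZeroDivisionError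
import Mathlib
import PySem

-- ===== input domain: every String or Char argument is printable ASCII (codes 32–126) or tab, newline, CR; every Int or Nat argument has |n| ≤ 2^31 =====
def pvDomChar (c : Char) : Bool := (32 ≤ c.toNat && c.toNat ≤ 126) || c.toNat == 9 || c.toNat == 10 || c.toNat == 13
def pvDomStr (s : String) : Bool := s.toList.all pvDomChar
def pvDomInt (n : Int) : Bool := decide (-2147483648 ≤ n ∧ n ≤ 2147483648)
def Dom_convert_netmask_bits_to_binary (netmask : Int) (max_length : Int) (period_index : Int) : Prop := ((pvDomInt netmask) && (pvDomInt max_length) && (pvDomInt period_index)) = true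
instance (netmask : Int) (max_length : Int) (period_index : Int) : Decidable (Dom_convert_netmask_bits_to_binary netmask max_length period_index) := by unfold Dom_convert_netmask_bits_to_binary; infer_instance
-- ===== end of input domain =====

-- B replaces A's per-position interleaving while-loop by a closed-form group count, one flat
-- bit-building pass and a slice/join formatting pass (objective: alternative decomposition, same cost).

-- ===== PORT A =====
-- the while-loop of A: one fuel tick per iteration (the loop runs exactly (max_length+1) times)
def pvA_loop (fuel : Nat) (i bits p : Int) (acc : List Char) : List Char :=
  match fuel with
  | 0 => acc
  | f + 1 =>
    if PySem.Int.mod i p = 0 then pvA_loop f (i + 1) bits p (acc ++ ['.'])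
    else if bits ≠ 0 then pvA_loop f (i + 1) (bits - 1) p (acc ++ ['1'])
    else pvA_loop f (i + 1) bits p (acc ++ ['0'])

def convert_netmask_bits_to_binary (netmask : Int) (max_length : Int) (period_index : Int) : String :=
  let binary_netmask := pvA_loop (max_length + 1).toNat 0 netmask period_index []
  -- binary_netmask[1:]
  String.ofList (PySem.List.slice binary_netmask (some 1) none)

-- ===== PORT B =====
-- the bit-building for-loop of Source B (state: the accumulated bits and the counter n)
def pvB_bits (n : Int) : Nat → List Char
  | 0 => []
  | c + 1 => (if n ≠ 0 then '1' else '0') :: pvB_bits (if n ≠ 0 then n - 1 else n) c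

def convert_netmask_bits_to_binary_alt (netmask : Int) (max_length : Int) (period_index : Int) : String :=
  let num_groups : Int := PySem.Int.floordiv max_length period_index + 1
  let num_bits : Int := (max_length + 1) - num_groups
  let bit_string : List Char := pvB_bits netmask num_bits.toNat
  let group_size : Int := period_index - 1
  String.ofList (List.intercalate ['.']
    ((List.range num_groups.toNat).map (fun (k : Nat) =>
      PySem.List.slice bit_string (some ((k : Int) * group_size)) (some (((k : Int) + 1) * group_size)))))

-- ===== PRECONDITION & SPEC =====
-- Pre_ restricts period_index to the natural domain of a group period (positive): on
-- period_index = 0 A raises ZeroDivisionError whenever max_length ≥ 0 (and B's floor division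
-- raises even for max_length < 0), and for a negative period A's negative-modulus dot placement
-- is outside the function's purpose and is not modelled by B's group arithmetic.
def Pre_convert_netmask_bits_to_binary (netmask : Int) (max_length : Int) (period_index : Int) : Prop :=
  1 ≤ period_index
instance (netmask : Int) (max_length : Int) (period_index : Int) : Decidable (Pre_convert_netmask_bits_to_binary netmask max_length period_index) := by unfold Pre_convert_netmask_bits_to_binary; infer_instance

def pvWitness_convert_netmask_bits_to_binary : Int × Int × Int := (24, 35, 9)

def Spec_convert_netmask_bits_to_binary (netmask : Int) (max_length : Int) (period_index : Int) (out : String) : Prop := out = convert_netmask_bits_to_binary_alt netmask max_length period_index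
instance (netmask : Int) (max_length : Int) (period_index : Int) (out : String) : Decidable (Spec_convert_netmask_bits_to_binary netmask max_length period_index out) := by unfold Spec_convert_netmask_bits_to_binary; infer_instance

-- ===== CLAIM (what is proved, stated in full; the proofs are below) =====
def Claim_equal_convert_netmask_bits_to_binary : Prop := ∀ (netmask : Int) (max_length : Int) (period_index : Int), Dom_convert_netmask_bits_to_binary netmask max_length period_index → Pre_convert_netmask_bits_to_binary netmask max_length period_index → Spec_convert_netmask_bits_to_binary netmask max_length period_index (convert_netmask_bits_to_binary netmask max_length period_index)

-- ===== LEMMAS AND PROOFS =====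

-- the counter after emitting c bit characters
def pvConsume : Int → Nat → Int
  | b, 0 => b
  | b, c + 1 => pvConsume (if b ≠ 0 then b - 1 else b) c

-- A's output from a dot position on, rem positions remaining (q' = |period_index|)
def pvRef (q' : Nat) (b : Int) (rem : Nat) : List Char :=
  match rem with
  | 0 => []
  | r + 1 =>
    '.' :: (pvB_bits b (min (q' - 1) r) ++
      pvRef q' (pvConsume b (min (q' - 1) r)) (r - min (q' - 1) r))
  termination_by rem
  decreasing_by omega

-- the same text as a list of chunks (the bits between consecutive dots)
def pvChunks (q' : Nat) (b : Int) (rem : Nat) : List (List Char) :=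
  match rem with
  | 0 => []
  | r + 1 =>
    pvB_bits b (min (q' - 1) r) ::
      pvChunks q' (pvConsume b (min (q' - 1) r)) (r - min (q' - 1) r)
  termination_by rem
  decreasing_by omega

theorem pvA_loop_append (f : Nat) : ∀ (i b p : Int) (acc : List Char),
    pvA_loop f i b p acc = acc ++ pvA_loop f i b p [] := by
  induction f with
  | zero => intro i b p acc; simp [pvA_loop]
  | succ f ih =>
    intro i b p acc
    simp only [pvA_loop]
    split_ifs with h1 h2
    · rw [ih (i+1) b p (acc ++ ['.']), ih (i+1) b p ([] ++ ['.'])]; simp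
    · rw [ih (i+1) (b-1) p (acc ++ ['1']), ih (i+1) (b-1) p ([] ++ ['1'])]; simp
    · rw [ih (i+1) b p (acc ++ ['0']), ih (i+1) b p ([] ++ ['0'])]; simp

theorem pvA_loop_run : ∀ (c f : Nat) (i b p : Int),
    (∀ j : Nat, j < c → ¬ (p ∣ (i + j))) →
    pvA_loop (c + f) i b p [] = pvB_bits b c ++ pvA_loop f (i + c) (pvConsume b c) p [] := by
  intro c
  induction c with
  | zero => intro f i b p _; simp [pvB_bits, pvConsume]
  | succ c ih =>
    intro f i b p h
    have h0 : ¬ (p ∣ i) := by simpa using h 0 (Nat.succ_pos c)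
    have hmod : ¬ (PySem.Int.mod i p = 0) := by
      rw [PySem.Int.mod_eq_zero_iff_dvd]; exact h0
    have hnext : ∀ j : Nat, j < c → ¬ (p ∣ ((i + 1) + j)) := by
      intro j hj hd
      apply h (j + 1) (by omega)
      have : i + ((j : Int) + 1) = i + 1 + (j : Int) := by ring
      push_cast
      rw [this]
      exact hd
    have hcast : i + ((c : Int) + 1) = (i + 1) + (c : Int) := by ring
    have hfuel : c + 1 + f = (c + f) + 1 := by omega
    rw [hfuel]
    simp only [pvA_loop, if_neg hmod]
    by_cases hb : b = 0
    · rw [if_neg (by simp [hb])]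
      rw [pvA_loop_append, ih f (i+1) b p hnext]
      simp only [pvB_bits, pvConsume, hb, if_neg (by simp : ¬ ((0:Int) ≠ 0))]
      push_cast
      rw [hcast]
      simp
    · rw [if_pos hb]
      rw [pvA_loop_append, ih f (i+1) (b-1) p hnext]
      simp only [pvB_bits, pvConsume, if_pos hb]
      push_cast
      rw [hcast]
      simp

theorem pvA_loop_ref (p : Int) (hp : p ≠ 0) : ∀ (rem : Nat) (i b : Int), p ∣ i →
    pvA_loop rem i b p [] = pvRef p.natAbs b rem := by
  intro rem
  induction rem using Nat.strong_induction_on with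
  | _ rem ih =>
    intro i b hdvd
    match rem with
    | 0 => simp [pvA_loop, pvRef]
    | r + 1 =>
      have hq : 1 ≤ p.natAbs := Int.natAbs_pos.mpr hp
      have hmod : PySem.Int.mod i p = 0 := (PySem.Int.mod_eq_zero_iff_dvd i p).mpr hdvd
      have hc : min (p.natAbs - 1) r ≤ p.natAbs - 1 := Nat.min_le_left _ _
      have hcr : min (p.natAbs - 1) r ≤ r := Nat.min_le_right _ _
      have hnd : ∀ j : Nat, j < min (p.natAbs - 1) r → ¬ (p ∣ ((i + 1) + j)) := by
        intro j hj hd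
        have h1j : p ∣ (1 + (j : Int)) := by
          have hsub := dvd_sub hd hdvd
          have : i + 1 + (j : Int) - i = 1 + (j : Int) := by ring
          rwa [this] at hsub
        have habs : ((p.natAbs : Nat) : Int) ∣ (1 + (j : Int)) := (Int.natAbs_dvd).mpr h1j
        have hle : ((p.natAbs : Nat) : Int) ≤ 1 + (j : Int) := Int.le_of_dvd (by positivity) habs
        omega
      have hrun := pvA_loop_run (min (p.natAbs - 1) r) (r - min (p.natAbs - 1) r) (i + 1) b p hnd
      rw [show min (p.natAbs - 1) r + (r - min (p.natAbs - 1) r) = r from by omega] at hrun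
      simp only [pvA_loop, if_pos hmod]
      rw [pvA_loop_append, hrun]
      by_cases h0 : r - min (p.natAbs - 1) r = 0
      · simp [pvA_loop, pvRef, h0]
      · have hcq : min (p.natAbs - 1) r = p.natAbs - 1 := by omega
        have hdvd' : p ∣ (i + 1 + ((min (p.natAbs - 1) r : Nat) : Int)) := by
          have : (1 : Int) + ((min (p.natAbs - 1) r : Nat) : Int) = ((p.natAbs : Nat) : Int) := by
            rw [hcq]; omega
          have h2 : i + 1 + ((min (p.natAbs - 1) r : Nat) : Int) = i + ((p.natAbs : Nat) : Int) := by
            rw [← this]; ring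
          rw [h2]
          exact dvd_add hdvd (Int.dvd_natAbs.mpr dvd_rfl)
        rw [ih (r - min (p.natAbs - 1) r) (by omega) _ _ hdvd']
        simp [pvRef]

theorem pvRef_tail (q' : Nat) : ∀ (rem : Nat) (b : Int), rem ≠ 0 →
    pvRef q' b rem = '.' :: List.intercalate ['.'] (pvChunks q' b rem) := by
  intro rem
  induction rem using Nat.strong_induction_on with
  | _ rem ih =>
    intro b hne
    match rem with
    | 0 => exact absurd rfl hne
    | r + 1 =>
      by_cases h0 : r - min (q' - 1) r = 0
      · simp only [pvRef, pvChunks, h0]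
        simp [List.intercalate]
      · obtain ⟨s, hs⟩ := Nat.exists_eq_succ_of_ne_zero h0
        simp only [pvRef, pvChunks]
        rw [ih (r - min (q' - 1) r) (by omega) _ h0]
        rw [hs]
        simp only [pvChunks]
        simp [List.intercalate]

theorem pvConsume_add (c : Nat) : ∀ (c' : Nat) (b : Int),
    pvConsume b (c + c') = pvConsume (pvConsume b c) c' := by
  induction c with
  | zero => intro c' b; simp [pvConsume]
  | succ c ih =>
    intro c' b
    rw [Nat.succ_add]
    simp only [pvConsume]
    exact ih c' _

theorem pvB_bits_drop (p : Nat) : ∀ (c : Nat) (n : Int),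
    List.drop p (pvB_bits n c) = pvB_bits (pvConsume n p) (c - p) := by
  induction p with
  | zero => intro c n; simp [pvConsume]
  | succ p ih =>
    intro c n
    match c with
    | 0 => simp [pvB_bits]
    | c + 1 =>
      simp only [pvB_bits, List.drop_succ_cons, pvConsume]
      rw [ih c _]
      congr 1
      omega

theorem pvB_bits_take (s : Nat) : ∀ (c : Nat) (n : Int),
    List.take s (pvB_bits n c) = pvB_bits n (min s c) := by
  induction s with
  | zero => intro c n; simp [pvB_bits]
  | succ s ih =>
    intro c n
    match c with
    | 0 => simp [pvB_bits]
    | c + 1 =>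
      simp only [pvB_bits, List.take_succ_cons]
      rw [ih c _]
      have : min (s + 1) (c + 1) = min s c + 1 := by omega
      rw [this]
      simp [pvB_bits]

theorem pvMapB (q' M : Nat) (hq : 1 ≤ q') (n : Int) :
    ∀ (d k : Nat), k + d = M / q' + 1 →
    (List.range' k d).map
      (fun j => pvB_bits (pvConsume n (j * (q' - 1))) (min (q' - 1) ((M - M / q') - j * (q' - 1))))
    = pvChunks q' (pvConsume n (k * (q' - 1))) (M + 1 - k * q') := by
  have hdm : M / q' * q' + M % q' = M := by rw [Nat.mul_comm]; exact Nat.div_add_mod M q'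
  have hmlt : M % q' < q' := Nat.mod_lt M (by omega)
  have hMq : M / q' * q' ≤ M := Nat.div_mul_le_self M q'
  intro d
  induction d with
  | zero =>
    intro k hk
    have hk' : k = M / q' + 1 := by omega
    have h0 : M + 1 - k * q' = 0 := by
      have : k * q' = M / q' * q' + q' := by rw [hk']; ring
      omega
    rw [h0]
    simp [pvChunks]
  | succ d ih =>
    intro k hk
    have hkle : k ≤ M / q' := by omega
    have hkq'le : k * q' ≤ M / q' * q' := Nat.mul_le_mul_right q' hkle
    have hrem : M + 1 - k * q' = (M - k * q') + 1 := by omega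
    rw [List.range'_succ, List.map_cons, hrem]
    conv_rhs => rw [pvChunks]
    have hkb : k * (q' - 1) = k * q' - k := by rw [Nat.mul_sub, Nat.mul_one]
    have e2 : (M / q') * (q' - 1) = M / q' * q' - M / q' := by rw [Nat.mul_sub, Nat.mul_one]
    have e3 : M / q' ≤ M / q' * q' := Nat.le_mul_of_pos_right _ (by omega)
    have hmin : min (q' - 1) ((M - M / q') - k * (q' - 1)) = min (q' - 1) (M - k * q') := by
      by_cases hklt : k < M / q'
      · have h1 : (k + 1) * q' ≤ M / q' * q' := Nat.mul_le_mul_right q' (by omega)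
        have h2 : (k + 1) * q' = k * q' + q' := by ring
        have e1 : (k + 1) * (q' - 1) ≤ (M / q') * (q' - 1) := Nat.mul_le_mul_right _ (by omega)
        have e4 : (k + 1) * (q' - 1) = k * (q' - 1) + (q' - 1) := by ring
        omega
      · have hkeq : k = M / q' := by omega
        subst hkeq
        omega
    rw [hmin]
    congr 1
    by_cases hklt : k < M / q'
    · -- full group: min = q' - 1, recurse via ih at k + 1
      have h1 : (k + 1) * q' ≤ M / q' * q' := Nat.mul_le_mul_right q' (by omega)
      have h2 : (k + 1) * q' = k * q' + q' := by ring
      have hminq : min (q' - 1) (M - k * q') = q' - 1 := by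
        apply min_eq_left; omega
      rw [hminq, ← pvConsume_add]
      rw [show k * (q' - 1) + (q' - 1) = (k + 1) * (q' - 1) from by ring]
      rw [show (M - k * q') - (q' - 1) = M + 1 - (k + 1) * q' from by omega]
      exact ih (k + 1) (by omega)
    · -- last group: both tails have 0 positions remaining
      have hkeq : k = M / q' := by omega
      have hd0 : d = 0 := by omega
      subst hd0
      have e2 : (M / q') * (q' - 1) = M / q' * q' - M / q' := by rw [Nat.mul_sub, Nat.mul_one]
      have e3 : M / q' ≤ M / q' * q' := Nat.le_mul_of_pos_right _ (by omega)
      have hminq : min (q' - 1) (M - k * q') = M - k * q' := by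
        apply min_eq_right
        subst hkeq
        omega
      rw [hminq, Nat.sub_self]
      simp [pvChunks]

-- ===== VERDICT (by name: the statement is the Claim_ definition above) =====
theorem convert_netmask_bits_to_binary_spec : Claim_equal_convert_netmask_bits_to_binary := by
  intro netmask max_length period_index _ hpre
  unfold Pre_convert_netmask_bits_to_binary at hpre
  unfold Spec_convert_netmask_bits_to_binary
  obtain ⟨q', hq'⟩ : ∃ q' : Nat, period_index = (q' : Int) := ⟨period_index.toNat, by omega⟩
  subst hq'
  have hq : 1 ≤ q' := by exact_mod_cast hpre
  have hp0 : ((q' : Nat) : Int) ≠ 0 := by exact_mod_cast (by omega : q' ≠ 0)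
  by_cases hml : max_length < 0
  · -- A's loop runs zero times and B has no groups: both return ''
    have hf : (max_length + 1).toNat = 0 := by omega
    have hg : (PySem.Int.floordiv max_length ((q' : Nat) : Int) + 1).toNat = 0 := by
      have h1 : PySem.Int.floordiv max_length ((q' : Nat) : Int) ≤ -1 := by
        have := PySem.Int.floordiv_mul_add_mod max_length ((q' : Nat) : Int)
        have hm := PySem.Int.mod_nonneg max_length (b := ((q' : Nat) : Int)) (by exact_mod_cast hq)
        nlinarith [PySem.Int.mod_lt max_length (b := ((q' : Nat) : Int)) (by exact_mod_cast hq)]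
      omega
    simp only [convert_netmask_bits_to_binary, convert_netmask_bits_to_binary_alt, hf, hg,
      pvA_loop, List.range_zero, List.map_nil, List.intercalate]
    rw [PySem.List.slice_from_one]
    rfl
  · obtain ⟨M, hM⟩ : ∃ M : Nat, max_length = (M : Int) := ⟨max_length.toNat, by omega⟩
    subst hM
    have hfuel : (((M : Nat) : Int) + 1).toNat = M + 1 := by omega
    -- A side
    have hA : convert_netmask_bits_to_binary netmask ((M : Nat) : Int) ((q' : Nat) : Int)
        = String.ofList (List.intercalate ['.'] (pvChunks q' netmask (M + 1))) := by
      simp only [convert_netmask_bits_to_binary]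
      rw [hfuel, pvA_loop_ref ((q' : Nat) : Int) hp0 (M + 1) 0 netmask (dvd_zero _),
        PySem.List.slice_from_one, Int.natAbs_natCast,
        pvRef_tail q' (M + 1) netmask (by omega)]
      rfl
    rw [hA]
    -- B side
    simp only [convert_netmask_bits_to_binary_alt]
    rw [PySem.Int.floordiv_natCast M q']
    have hdiv : M / q' ≤ M := Nat.div_le_self _ _
    have hbitsN : ((((M : Nat) : Int) + 1) - (((M / q' : Nat) : Int) + 1)).toNat = M - M / q' := by
      rw [show (((M : Nat) : Int) + 1) - (((M / q' : Nat) : Int) + 1) = ((M - M / q' : Nat) : Int) from by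
        rw [Nat.cast_sub hdiv]; ring]
      exact Int.toNat_natCast _
    have hgN : ((((M / q' : Nat)) : Int) + 1).toNat = M / q' + 1 := by
      rw [show (((M / q' : Nat) : Int) + 1) = ((M / q' + 1 : Nat) : Int) from by push_cast; ring]
      exact Int.toNat_natCast _
    rw [hbitsN, hgN, List.range_eq_range']
    have hmap : (List.range' 0 (M / q' + 1)).map
        (fun (k : Nat) => PySem.List.slice (pvB_bits netmask (M - M / q'))
          (some ((k : Int) * (((q' : Nat) : Int) - 1))) (some (((k : Int) + 1) * (((q' : Nat) : Int) - 1))))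
        = (List.range' 0 (M / q' + 1)).map
          (fun j => pvB_bits (pvConsume netmask (j * (q' - 1)))
            (min (q' - 1) ((M - M / q') - j * (q' - 1)))) := by
      apply List.map_congr_left
      intro k _
      have e1 : (k : Int) * (((q' : Nat) : Int) - 1) = ((k * (q' - 1) : Nat) : Int) := by
        push_cast [Nat.cast_sub hq]; ring
      have e2 : ((k : Int) + 1) * (((q' : Nat) : Int) - 1) = (((k + 1) * (q' - 1) : Nat) : Int) := by
        push_cast [Nat.cast_sub hq]; ring
      rw [e1, e2, PySem.List.slice_natCast]
      rw [pvB_bits_drop, pvB_bits_take]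
      congr 1
      have : (k + 1) * (q' - 1) - k * (q' - 1) = q' - 1 := by
        rw [Nat.add_mul, Nat.one_mul]; omega
      rw [this]
    rw [hmap, pvMapB q' M hq netmask (M / q' + 1) 0 (by omega)]
    simp [pvConsume]
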